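-- pv_equiv track=rewrite | github.com/hbwzhsh/state_tracker | policy/memory_policy.py | turns2states
-- ===== SOURCE A (Python) =====
-- def turns2states(turns,max_history):
--     states = []
--     for slice_end, turn in enumerate(turns):
--         slice_start = max(0, slice_end + 1 - max_history)
--         entire_his = turns[slice_start:slice_end] + [turns[slice_end]]
--         entire_his_intent = [u["user"] for u in entire_his]
--         vec = []
--         for intent in entire_his_intent:
--             vec.append(intent)
--         padding = [None] * max(0, max_history - (slice_end + 1))
--         vec = padding + vec
--         states.append([vec, turn["bot"]])
--     return states
-- ===== SOURCE B (Python) =====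
-- def turns2states(turns, max_history):
--     # Maintain a running window of recent user intents instead of re-slicing per turn.
--     # The window always holds at least the current intent (matching the original for
--     # max_history <= 0) and at most max_history intents.
--     cap = max(1, max_history)
--     window = []
--     states = []
--     for turn in turns:
--         window.append(turn["user"])
--         if len(window) > cap:
--             window.pop(0)
--         states.append([[None] * (max_history - len(window)) + list(window), turn["bot"]])
--     return states
-- ===== Notes on version B (the rewrite author's own statement) =====
-- stated objective: idiomatic
-- what changed: B maintains one running bounded window of user intents (append, drop oldest) in a single pass instead of recomputing a slice of the turn list with index arithmetic at every turn.
import Mathlib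
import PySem

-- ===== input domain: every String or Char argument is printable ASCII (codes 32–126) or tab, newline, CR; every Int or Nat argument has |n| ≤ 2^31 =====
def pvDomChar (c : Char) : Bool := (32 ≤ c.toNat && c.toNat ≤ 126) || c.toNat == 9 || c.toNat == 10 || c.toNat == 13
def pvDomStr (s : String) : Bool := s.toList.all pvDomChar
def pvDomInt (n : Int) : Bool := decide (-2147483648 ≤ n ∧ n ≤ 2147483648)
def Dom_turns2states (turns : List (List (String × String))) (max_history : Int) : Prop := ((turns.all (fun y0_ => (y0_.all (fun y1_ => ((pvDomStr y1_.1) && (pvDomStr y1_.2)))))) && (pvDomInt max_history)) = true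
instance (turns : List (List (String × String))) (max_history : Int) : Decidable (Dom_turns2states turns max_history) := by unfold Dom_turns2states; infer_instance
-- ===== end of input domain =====

-- B maintains a running bounded window of user intents instead of re-slicing the turn
-- list at every index (objective: more idiomatic / alternative one-pass formulation).

-- shared primitive: Python dict lookup turn[k] (first match in the association list)
def pvLookup (d : List (String × String)) (k : String) : Option String :=
  (d.find? (fun p => p.1 == k)).map (·.2)

-- ===== PORT A =====
def turns2states (turns : List (List (String × String))) (max_history : Int) : List (List (Option String) × String) :=
  (PySem.List.enumerate turns).foldl (fun states p =>
    let slice_end : Int := p.1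
    let turn := p.2
    let slice_start := max 0 (slice_end + 1 - max_history)
    let entire_his := PySem.List.slice turns (some slice_start) (some slice_end) ++
      [PySem.List.pyGetD turns slice_end []]
    let entire_his_intent := entire_his.map (fun u => pvLookup u "user")
    let vec := entire_his_intent.foldl (fun v i => v ++ [i]) ([] : List (Option String))
    let padding := List.replicate (max 0 (max_history - (slice_end + 1))).toNat (none : Option String)
    let vec := padding ++ vec
    states ++ [(vec, (pvLookup turn "bot").getD "")]) []

-- ===== PORT B =====
def altLoop (max_history cap : Int) :
    List (List (String × String)) → List (Option String) → List (List (Option String) × String)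
  | [], _ => []
  | turn :: rest, window =>
    let window := window ++ [pvLookup turn "user"]
    let window := if (window.length : Int) > cap then window.tail else window
    (List.replicate (max_history - (window.length : Int)).toNat (none : Option String) ++ window,
      (pvLookup turn "bot").getD "") :: altLoop max_history cap rest window

def turns2states_alt (turns : List (List (String × String))) (max_history : Int) : List (List (Option String) × String) :=
  altLoop max_history (max 1 max_history) turns []

-- ===== PRECONDITION & SPEC =====
-- Pre_ excludes turns missing a "user" or "bot" key, on which the Python A raises KeyError.
def Pre_turns2states (turns : List (List (String × String))) (max_history : Int) : Prop :=
  ∀ t ∈ turns, (pvLookup t "user").isSome = true ∧ (pvLookup t "bot").isSome = true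
instance (turns : List (List (String × String))) (max_history : Int) : Decidable (Pre_turns2states turns max_history) := by unfold Pre_turns2states; infer_instance
def pvWitness_turns2states : (List (List (String × String))) × Int :=
  ([[("user", "greet"), ("bot", "hello")], [("user", "bye"), ("bot", "goodbye")]], 3)

def Spec_turns2states (turns : List (List (String × String))) (max_history : Int) (out : List (List (Option String) × String)) : Prop := out = turns2states_alt turns max_history
instance (turns : List (List (String × String))) (max_history : Int) (out : List (List (Option String) × String)) : Decidable (Spec_turns2states turns max_history out) := by unfold Spec_turns2states; infer_instance

-- ===== CLAIM (what is proved, stated in full; the proofs are below) =====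
def Claim_equal_turns2states : Prop := ∀ (turns : List (List (String × String))) (max_history : Int), Dom_turns2states turns max_history → Pre_turns2states turns max_history → Spec_turns2states turns max_history (turns2states turns max_history)

-- ===== LEMMAS AND PROOFS =====

-- the state A builds for index i (turn = turns[i])
def AState (turns : List (List (String × String))) (max_history : Int)
    (p : Int × List (String × String)) : List (Option String) × String :=
  (List.replicate (max 0 (max_history - (p.1 + 1))).toNat (none : Option String) ++
      (PySem.List.slice turns (some (max 0 (p.1 + 1 - max_history))) (some p.1) ++
        [PySem.List.pyGetD turns p.1 []]).map (fun u => pvLookup u "user"),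
    (pvLookup p.2 "bot").getD "")

lemma flatten_singleton_map {α β : Type} (g : α → β) (l : List α) :
    (l.map (fun x => [g x])).flatten = l.map g := by
  induction l with
  | nil => simp
  | cons x xs ih => simp [ih]

lemma turns2states_eq_map (turns : List (List (String × String))) (mh : Int) :
    turns2states turns mh = (PySem.List.enumerate turns).map (AState turns mh) := by
  simp [turns2states, AState, Function.comp_def, flatten_singleton_map]

lemma main_lemma (mh : Int) (turns : List (List (String × String))) :
    ∀ (suf pre : List (List (String × String))), turns = pre ++ suf →
    (PySem.List.enumerate suf (pre.length : Int)).map (AState turns mh)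
      = altLoop mh (max 1 mh) suf
          ((pre.map (fun t => pvLookup t "user")).drop (pre.length - (max 1 mh).toNat)) := by
  intro suf
  induction suf with
  | nil => intro pre h; simp [altLoop]
  | cons t rest ih =>
    intro pre h
    obtain ⟨capN, hcapN⟩ : ∃ c : Nat, c = (max 1 mh).toNat := ⟨_, rfl⟩
    rw [PySem.List.enumerate_cons, List.map_cons, altLoop, ← hcapN]
    have hcap : 1 ≤ capN := by omega
    have hlenwin : ((pre.map (fun t => pvLookup t "user")).drop (pre.length - capN)).length
        = pre.length - (pre.length - capN) := by simp
    -- the updated window equals the window of the extended prefix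
    have hwin :
        (if ((((pre.map (fun t => pvLookup t "user")).drop (pre.length - capN)) ++ [pvLookup t "user"]).length : Int) > (max 1 mh)
          then (((pre.map (fun t => pvLookup t "user")).drop (pre.length - capN)) ++ [pvLookup t "user"]).tail
          else (((pre.map (fun t => pvLookup t "user")).drop (pre.length - capN)) ++ [pvLookup t "user"]))
        = ((pre ++ [t]).map (fun t => pvLookup t "user")).drop (pre.length + 1 - capN) := by
      rw [List.map_append, List.map_singleton]
      by_cases hbig : capN ≤ pre.length
      · -- window was full: drop the head
        have hc : ((((pre.map (fun t => pvLookup t "user")).drop (pre.length - capN)) ++ [pvLookup t "user"]).length : Int) > (max 1 mh) := by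
          rw [List.length_append, hlenwin, List.length_singleton]
          omega
        rw [if_pos hc]
        have hlen' : 1 ≤ ((pre.map (fun t => pvLookup t "user")).drop (pre.length - capN)).length := by
          rw [hlenwin]; omega
        rw [← List.drop_one, List.drop_append_of_le_length hlen', List.drop_drop,
          List.drop_append_of_le_length (by simp; omega)]
        congr 2
        omega
      · have hc : ¬ (((((pre.map (fun t => pvLookup t "user")).drop (pre.length - capN)) ++ [pvLookup t "user"]).length : Int) > (max 1 mh)) := by
          rw [List.length_append, hlenwin, List.length_singleton]
          omega
        rw [if_neg hc]
        have h0 : pre.length - capN = 0 := by omega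
        have h0' : pre.length + 1 - capN = 0 := by omega
        rw [h0, h0', List.drop_zero, List.drop_zero]
    rw [hwin]
    have hpre' : turns = (pre ++ [t]) ++ rest := by simpa using h
    have hih := ih (pre ++ [t]) hpre'
    simp only [List.length_append, List.length_singleton, ← hcapN] at hih
    have hcast : (pre.length : Int) + 1 = ((pre.length + 1 : Nat) : Int) := by push_cast; ring
    rw [hcast, hih]
    congr 1
    -- the head states agree
    have hwinlen : (((pre ++ [t]).map (fun t => pvLookup t "user")).drop (pre.length + 1 - capN)).length
        = (pre.length + 1) - (pre.length + 1 - capN) := by simp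
    unfold AState
    dsimp only
    apply Prod.ext
    · -- the vec component
      show List.replicate _ _ ++ _ = List.replicate _ _ ++ _
      have hgd : PySem.List.pyGetD turns ((pre.length : Nat) : Int) ([] : List (String × String)) = t := by
        rw [PySem.List.pyGetD_natCast, h]
        simp [List.getD_eq_getElem?_getD]
      rw [hgd]
      have hs : (0 : Int) ≤ max 0 ((pre.length : Int) + 1 - mh) := le_max_left _ _
      rw [PySem.List.slice_toNat turns hs (by positivity)]
      have htoNat : (max 0 ((pre.length : Int) + 1 - mh)).toNat = ((pre.length : Int) + 1 - mh).toNat := by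
        omega
      set s := ((pre.length : Int) + 1 - mh).toNat with hsdef
      congr 1
      · -- the padding lengths agree
        congr 1
        rw [hwinlen]
        omega
      · -- the window contents agree
        rw [htoNat]
        by_cases hsle : s ≤ pre.length
        · have hnt : ((pre.length : Int)).toNat = pre.length := by omega
          have hdropN : pre.length + 1 - capN = s := by omega
          rw [hnt, h, List.drop_append_of_le_length hsle,
            List.take_append_of_le_length (by simp)]
          have htk : (pre.drop s).take (pre.length - s) = pre.drop s := by
            apply List.take_of_length_le; simp
          rw [htk, hdropN, List.map_append, List.map_singleton, List.map_append,
            List.map_singleton, List.drop_append_of_le_length (by simp; omega), List.map_drop]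
        · -- only the current turn remains in the window (mh ≤ 0)
          have hcap1 : capN = 1 := by omega
          have htake0 : ((pre.length : Int)).toNat - s = 0 := by omega
          rw [htake0, List.take_zero, List.nil_append, hcap1]
          simp
    · rfl

theorem pv_equal (turns : List (List (String × String))) (mh : Int) :
    turns2states turns mh = turns2states_alt turns mh := by
  rw [turns2states_eq_map, turns2states_alt]
  have := main_lemma mh turns turns [] (by simp)
  simpa using this

-- ===== VERDICT (by name: the statement is the Claim_ definition above) =====
theorem turns2states_spec : Claim_equal_turns2states := by
  intro turns mh _ _
  unfold Spec_turns2states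
  exact pv_equal turns mh
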